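-- pv_equiv track=rewrite | github.com/lbliii/pulp-fiction-generator | pulp_fiction_generator/agents/builder/agent_builder.py | _infer_agent_type
-- ===== SOURCE A (Python) =====
-- def _infer_agent_type(role: str) -> str:
--     """
--     Infer the agent type from its role.
--
--     Args:
--         role: The agent's role
--
--     Returns:
--         Inferred agent type
--     """
--     role_lower = role.lower()
--
--     if any(term in role_lower for term in ["world", "setting", "environment"]):
--         return "worldbuilding"
--     elif any(term in role_lower for term in ["research", "investigate", "analyze"]):
--         return "research"
--     elif any(term in role_lower for term in ["character", "protagonist", "antagonist"]):
--         return "character"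
--     elif any(term in role_lower for term in ["plot", "outline", "structure"]):
--         return "plotting"
--     elif any(term in role_lower for term in ["write", "author", "storytell"]):
--         return "writing"
--     elif any(term in role_lower for term in ["edit", "review", "feedback"]):
--         return "editing"
--     elif any(term in role_lower for term in ["manage", "coordinate", "plan"]):
--         return "management"
--     else:
--         return "general"
-- ===== SOURCE B (Python) =====
-- _KEYWORD_PRIORITY = {
--     "world": 0, "setting": 0, "environment": 0,
--     "research": 1, "investigate": 1, "analyze": 1,
--     "character": 2, "protagonist": 2, "antagonist": 2,
--     "plot": 3, "outline": 3, "structure": 3,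
--     "write": 4, "author": 4, "storytell": 4,
--     "edit": 5, "review": 5, "feedback": 5,
--     "manage": 6, "coordinate": 6, "plan": 6,
-- }
--
-- _TYPES = ["worldbuilding", "research", "character", "plotting",
--           "writing", "editing", "management", "general"]
--
-- def _infer_agent_type(role: str) -> str:
--     # Single left-to-right scan over the role: at each position, see which
--     # keywords start there and keep the best (lowest) priority seen anywhere.
--     role_lower = role.lower()
--     best = 7
--     for i in range(len(role_lower)):
--         for kw, prio in _KEYWORD_PRIORITY.items():
--             if prio < best and role_lower.startswith(kw, i):
--                 best = prio
--     return _TYPES[best]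
-- ===== Notes on version B (the rewrite author's own statement) =====
-- stated objective: alternative
-- what changed: Instead of testing keyword groups in elif priority order with substring searches, B makes one left-to-right scan over the role's positions, checking which keywords start at each position and keeping the minimum priority seen, then indexes a type list with it.
import Mathlib
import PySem

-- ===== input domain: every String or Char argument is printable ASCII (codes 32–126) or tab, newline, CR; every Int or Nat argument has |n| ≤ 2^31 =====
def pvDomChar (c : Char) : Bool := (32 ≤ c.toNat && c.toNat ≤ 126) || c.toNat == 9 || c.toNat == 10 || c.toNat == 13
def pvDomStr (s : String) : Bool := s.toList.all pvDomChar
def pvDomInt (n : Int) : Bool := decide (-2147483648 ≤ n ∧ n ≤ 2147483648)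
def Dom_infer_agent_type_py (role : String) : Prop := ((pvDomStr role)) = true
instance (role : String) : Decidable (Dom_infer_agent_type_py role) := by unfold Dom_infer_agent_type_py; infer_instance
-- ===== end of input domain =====

-- B replaces A's elif chain of whole-string substring tests by a single positional scan
-- keeping the minimum keyword priority seen (alternative decomposition, same cost).

-- ===== PORT A =====
def infer_agent_type_py (role : String) : String :=
  let role_lower := PySem.Str.lower role
  if ["world", "setting", "environment"].any (fun term => PySem.Str.isIn term role_lower) then
    "worldbuilding"
  else if ["research", "investigate", "analyze"].any (fun term => PySem.Str.isIn term role_lower) then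
    "research"
  else if ["character", "protagonist", "antagonist"].any (fun term => PySem.Str.isIn term role_lower) then
    "character"
  else if ["plot", "outline", "structure"].any (fun term => PySem.Str.isIn term role_lower) then
    "plotting"
  else if ["write", "author", "storytell"].any (fun term => PySem.Str.isIn term role_lower) then
    "writing"
  else if ["edit", "review", "feedback"].any (fun term => PySem.Str.isIn term role_lower) then
    "editing"
  else if ["manage", "coordinate", "plan"].any (fun term => PySem.Str.isIn term role_lower) then
    "management"
  else
    "general"

-- ===== PORT B =====
def pvKwPriority : List (String × Nat) :=
  [ ("world", 0), ("setting", 0), ("environment", 0)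
  , ("research", 1), ("investigate", 1), ("analyze", 1)
  , ("character", 2), ("protagonist", 2), ("antagonist", 2)
  , ("plot", 3), ("outline", 3), ("structure", 3)
  , ("write", 4), ("author", 4), ("storytell", 4)
  , ("edit", 5), ("review", 5), ("feedback", 5)
  , ("manage", 6), ("coordinate", 6), ("plan", 6) ]

def pvTypes : List String :=
  ["worldbuilding", "research", "character", "plotting", "writing", "editing", "management", "general"]

def infer_agent_type_py_alt (role : String) : String :=
  let rl := (PySem.Str.lower role).toList
  -- role_lower.startswith(kw, i) with 0 ≤ i is exactly a prefix test on rl.drop i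
  let best := (List.range rl.length).foldl
    (fun best i => pvKwPriority.foldl
      (fun b p => if p.2 < b ∧ PySem.Chars.startswith (rl.drop i) p.1.toList then p.2 else b)
      best)
    7
  -- _TYPES[best]: best ≤ 7 always, so the index is in range; getD keeps the port total
  pvTypes.getD best "general"

-- ===== PRECONDITION & SPEC =====
def Spec_infer_agent_type_py (role : String) (out : String) : Prop := out = infer_agent_type_py_alt role
instance (role : String) (out : String) : Decidable (Spec_infer_agent_type_py role out) := by unfold Spec_infer_agent_type_py; infer_instance

-- ===== CLAIM (what is proved, stated in full; the proofs are below) =====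
def Claim_equal_infer_agent_type_py : Prop := ∀ (role : String), Dom_infer_agent_type_py role → Spec_infer_agent_type_py role (infer_agent_type_py role)

-- ===== LEMMAS AND PROOFS =====

-- keyword p.2 occurs in rl
def pvOcc (rl : List Char) (j : Nat) : Prop :=
  ∃ p ∈ pvKwPriority, p.2 = j ∧ PySem.Chars.isIn p.1.toList rl = true

lemma pvInner (rl : List Char) (i : Nat) :
    ∀ (t : List (String × Nat)) (b : Nat),
      (t.foldl (fun b p => if p.2 < b ∧ PySem.Chars.startswith (rl.drop i) p.1.toList then p.2 else b) b ≤ b)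
      ∧ (t.foldl (fun b p => if p.2 < b ∧ PySem.Chars.startswith (rl.drop i) p.1.toList then p.2 else b) b = b
          ∨ ∃ p ∈ t, (t.foldl (fun b p => if p.2 < b ∧ PySem.Chars.startswith (rl.drop i) p.1.toList then p.2 else b) b) = p.2
              ∧ PySem.Chars.startswith (rl.drop i) p.1.toList = true)
      ∧ (∀ p ∈ t, PySem.Chars.startswith (rl.drop i) p.1.toList = true →
          t.foldl (fun b p => if p.2 < b ∧ PySem.Chars.startswith (rl.drop i) p.1.toList then p.2 else b) b ≤ p.2) := by
  intro t
  induction t with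
  | nil => intro b; refine ⟨le_refl _, Or.inl rfl, by simp⟩
  | cons q t ih =>
    intro b
    simp only [List.foldl_cons, List.mem_cons]
    by_cases h : q.2 < b ∧ PySem.Chars.startswith (rl.drop i) q.1.toList
    · rw [if_pos h]
      obtain ⟨h1, h2, h3⟩ := ih q.2
      refine ⟨le_trans h1 (le_of_lt h.1), ?_, ?_⟩
      · rcases h2 with h2 | ⟨p, hp, hr, hs⟩
        · exact Or.inr ⟨q, Or.inl rfl, h2, h.2⟩
        · exact Or.inr ⟨p, Or.inr hp, hr, hs⟩
      · rintro p (rfl | hp) hs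
        · exact h1
        · exact h3 p hp hs
    · rw [if_neg h]
      obtain ⟨h1, h2, h3⟩ := ih b
      refine ⟨h1, ?_, ?_⟩
      · rcases h2 with h2 | ⟨p, hp, hr, hs⟩
        · exact Or.inl h2
        · exact Or.inr ⟨p, Or.inr hp, hr, hs⟩
      · rintro p (rfl | hp) hs
        · exact le_trans h1 (le_of_not_gt fun hb => h ⟨hb, hs⟩)
        · exact h3 p hp hs

lemma pvOuter (rl : List Char) :
    ∀ (L : List Nat) (b : Nat),
      (L.foldl (fun best i => pvKwPriority.foldl
          (fun b p => if p.2 < b ∧ PySem.Chars.startswith (rl.drop i) p.1.toList then p.2 else b) best) b ≤ b)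
      ∧ (L.foldl (fun best i => pvKwPriority.foldl
            (fun b p => if p.2 < b ∧ PySem.Chars.startswith (rl.drop i) p.1.toList then p.2 else b) best) b = b
          ∨ ∃ i ∈ L, ∃ p ∈ pvKwPriority,
              (L.foldl (fun best i => pvKwPriority.foldl
                (fun b p => if p.2 < b ∧ PySem.Chars.startswith (rl.drop i) p.1.toList then p.2 else b) best) b) = p.2
              ∧ PySem.Chars.startswith (rl.drop i) p.1.toList = true)
      ∧ (∀ i ∈ L, ∀ p ∈ pvKwPriority, PySem.Chars.startswith (rl.drop i) p.1.toList = true →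
          L.foldl (fun best i => pvKwPriority.foldl
            (fun b p => if p.2 < b ∧ PySem.Chars.startswith (rl.drop i) p.1.toList then p.2 else b) best) b ≤ p.2) := by
  intro L
  induction L with
  | nil => intro b; refine ⟨le_refl _, Or.inl rfl, by simp⟩
  | cons i L ih =>
    intro b
    simp only [List.foldl_cons, List.mem_cons]
    obtain ⟨g1, g2, g3⟩ := pvInner rl i pvKwPriority b
    obtain ⟨h1, h2, h3⟩ := ih (pvKwPriority.foldl
      (fun b p => if p.2 < b ∧ PySem.Chars.startswith (rl.drop i) p.1.toList then p.2 else b) b)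
    refine ⟨le_trans h1 g1, ?_, ?_⟩
    · rcases h2 with h2 | ⟨i', hi', p, hp, hr, hs⟩
      · rw [h2]
        rcases g2 with g2 | ⟨p, hp, hr, hs⟩
        · exact Or.inl g2
        · exact Or.inr ⟨i, Or.inl rfl, p, hp, hr, hs⟩
      · exact Or.inr ⟨i', Or.inr hi', p, hp, hr, hs⟩
    · rintro i' (rfl | hi') p hp hs
      · exact le_trans h1 (g3 p hp hs)
      · exact h3 i' hi' p hp hs

lemma pvBestEq (rl : List Char) (j : Nat) (hj : j ≤ 7)
    (hmem : j = 7 ∨ pvOcc rl j) (hmin : ∀ j', j' < j → ¬ pvOcc rl j') :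
    (List.range rl.length).foldl
      (fun best i => pvKwPriority.foldl
        (fun b p => if p.2 < b ∧ PySem.Chars.startswith (rl.drop i) p.1.toList then p.2 else b) best) 7 = j := by
  have hne : ∀ p ∈ pvKwPriority, p.1.toList ≠ [] := by decide
  obtain ⟨o1, o2, o3⟩ := pvOuter rl (List.range rl.length) 7
  have hub : (List.range rl.length).foldl
      (fun best i => pvKwPriority.foldl
        (fun b p => if p.2 < b ∧ PySem.Chars.startswith (rl.drop i) p.1.toList then p.2 else b) best) 7 ≤ j := by
    rcases hmem with rfl | ⟨p, hp, rfl, hin⟩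
    · exact o1
    · obtain ⟨k, hk⟩ := (PySem.Chars.exists_prefix_drop_iff_isIn _ _).mpr hin
      have hlen := hk.length_le
      have hd : (rl.drop k).length = rl.length - k := List.length_drop
      have hpos : 0 < p.1.toList.length := List.length_pos_of_ne_nil (hne p hp)
      have hklt : k < rl.length := by omega
      exact o3 k (List.mem_range.mpr hklt) p hp ((PySem.Chars.startswith_iff _ _).mpr hk)
  rcases o2 with h2 | ⟨i, _, p, hp, hr, hs⟩
  · omega
  · have hin : PySem.Chars.isIn p.1.toList rl = true :=
      (PySem.Chars.exists_prefix_drop_iff_isIn _ _).mp ⟨i, (PySem.Chars.startswith_iff _ _).mp hs⟩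
    have hge : ¬ p.2 < j := fun hlt => hmin p.2 hlt ⟨p, hp, rfl, hin⟩
    omega

-- ===== VERDICT (by name: the statement is the Claim_ definition above) =====
lemma pvOcc_0 (rl : List Char) : pvOcc rl 0 ↔ (PySem.Chars.isIn "world".toList rl = true ∨ PySem.Chars.isIn "setting".toList rl = true ∨ PySem.Chars.isIn "environment".toList rl = true) := by
  simp [pvOcc, pvKwPriority]

lemma pvOcc_1 (rl : List Char) : pvOcc rl 1 ↔ (PySem.Chars.isIn "research".toList rl = true ∨ PySem.Chars.isIn "investigate".toList rl = true ∨ PySem.Chars.isIn "analyze".toList rl = true) := by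
  simp [pvOcc, pvKwPriority]

lemma pvOcc_2 (rl : List Char) : pvOcc rl 2 ↔ (PySem.Chars.isIn "character".toList rl = true ∨ PySem.Chars.isIn "protagonist".toList rl = true ∨ PySem.Chars.isIn "antagonist".toList rl = true) := by
  simp [pvOcc, pvKwPriority]

lemma pvOcc_3 (rl : List Char) : pvOcc rl 3 ↔ (PySem.Chars.isIn "plot".toList rl = true ∨ PySem.Chars.isIn "outline".toList rl = true ∨ PySem.Chars.isIn "structure".toList rl = true) := by
  simp [pvOcc, pvKwPriority]

lemma pvOcc_4 (rl : List Char) : pvOcc rl 4 ↔ (PySem.Chars.isIn "write".toList rl = true ∨ PySem.Chars.isIn "author".toList rl = true ∨ PySem.Chars.isIn "storytell".toList rl = true) := by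
  simp [pvOcc, pvKwPriority]

lemma pvOcc_5 (rl : List Char) : pvOcc rl 5 ↔ (PySem.Chars.isIn "edit".toList rl = true ∨ PySem.Chars.isIn "review".toList rl = true ∨ PySem.Chars.isIn "feedback".toList rl = true) := by
  simp [pvOcc, pvKwPriority]

lemma pvOcc_6 (rl : List Char) : pvOcc rl 6 ↔ (PySem.Chars.isIn "manage".toList rl = true ∨ PySem.Chars.isIn "coordinate".toList rl = true ∨ PySem.Chars.isIn "plan".toList rl = true) := by
  simp [pvOcc, pvKwPriority]

theorem infer_agent_type_py_spec : Claim_equal_infer_agent_type_py := by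
  intro role _
  unfold Spec_infer_agent_type_py
  simp only [infer_agent_type_py, infer_agent_type_py_alt, List.any_cons, List.any_nil,
    Bool.or_eq_true, Bool.or_false, PySem.Str.isIn_eq, PySem.Str.toList_lower]
  split_ifs with h1 h2 h3 h4 h5 h6 h7
  · rw [pvBestEq (PySem.Chars.lower role.toList) 0 (by omega) (Or.inr ((pvOcc_0 _).mpr h1))
      (fun j' hj' _ => absurd hj' (by omega))]
    rfl
  · rw [pvBestEq (PySem.Chars.lower role.toList) 1 (by omega) (Or.inr ((pvOcc_1 _).mpr h2))
      (by
      intro j' hj' ho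
      interval_cases j'
      · exact h1 ((pvOcc_0 _).mp ho))]
    rfl
  · rw [pvBestEq (PySem.Chars.lower role.toList) 2 (by omega) (Or.inr ((pvOcc_2 _).mpr h3))
      (by
      intro j' hj' ho
      interval_cases j'
      · exact h1 ((pvOcc_0 _).mp ho)
      · exact h2 ((pvOcc_1 _).mp ho))]
    rfl
  · rw [pvBestEq (PySem.Chars.lower role.toList) 3 (by omega) (Or.inr ((pvOcc_3 _).mpr h4))
      (by
      intro j' hj' ho
      interval_cases j'
      · exact h1 ((pvOcc_0 _).mp ho)
      · exact h2 ((pvOcc_1 _).mp ho)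
      · exact h3 ((pvOcc_2 _).mp ho))]
    rfl
  · rw [pvBestEq (PySem.Chars.lower role.toList) 4 (by omega) (Or.inr ((pvOcc_4 _).mpr h5))
      (by
      intro j' hj' ho
      interval_cases j'
      · exact h1 ((pvOcc_0 _).mp ho)
      · exact h2 ((pvOcc_1 _).mp ho)
      · exact h3 ((pvOcc_2 _).mp ho)
      · exact h4 ((pvOcc_3 _).mp ho))]
    rfl
  · rw [pvBestEq (PySem.Chars.lower role.toList) 5 (by omega) (Or.inr ((pvOcc_5 _).mpr h6))
      (by
      intro j' hj' ho
      interval_cases j'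
      · exact h1 ((pvOcc_0 _).mp ho)
      · exact h2 ((pvOcc_1 _).mp ho)
      · exact h3 ((pvOcc_2 _).mp ho)
      · exact h4 ((pvOcc_3 _).mp ho)
      · exact h5 ((pvOcc_4 _).mp ho))]
    rfl
  · rw [pvBestEq (PySem.Chars.lower role.toList) 6 (by omega) (Or.inr ((pvOcc_6 _).mpr h7))
      (by
      intro j' hj' ho
      interval_cases j'
      · exact h1 ((pvOcc_0 _).mp ho)
      · exact h2 ((pvOcc_1 _).mp ho)
      · exact h3 ((pvOcc_2 _).mp ho)
      · exact h4 ((pvOcc_3 _).mp ho)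
      · exact h5 ((pvOcc_4 _).mp ho)
      · exact h6 ((pvOcc_5 _).mp ho))]
    rfl
  · rw [pvBestEq (PySem.Chars.lower role.toList) 7 (by omega) (Or.inl rfl)
      (by
      intro j' hj' ho
      interval_cases j'
      · exact h1 ((pvOcc_0 _).mp ho)
      · exact h2 ((pvOcc_1 _).mp ho)
      · exact h3 ((pvOcc_2 _).mp ho)
      · exact h4 ((pvOcc_3 _).mp ho)
      · exact h5 ((pvOcc_4 _).mp ho)
      · exact h6 ((pvOcc_5 _).mp ho)
      · exact h7 ((pvOcc_6 _).mp ho))]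
    rfl
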